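-- pv_equiv track=rewrite | github.com/idameitil/sdpl-utilizing-gts | src/compare-architectures/run-dssp.py | get_SS_string
-- ===== SOURCE A (Python) =====
-- def get_SS_string(dssp_object):
--     SS_string = 'type,end\n'
--     previous = ''
--     for residue in dssp_object:
--         SS_translation = {'H': 'h', 'B': 'l', 'E': 's', 'G': 'h', 'I': 'h', 'T': 'l', 'S': 'l', '-': 'l'}
--         simplified_secondary_structure = SS_translation[residue[2]]
--         position = residue[0]
--         if simplified_secondary_structure == previous:
--             continue
--         if previous == 'h':
--             SS_string += f"h,{position-1}\n"
--         elif previous == 's':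
--             SS_string += f"s,{position-1}\n"
--         elif previous == 'l':
--             SS_string += f"l,{position-1}\n"
--         previous = simplified_secondary_structure
--     return SS_string
-- ===== SOURCE B (Python) =====
-- def get_SS_string(dssp_object):
--     SS_translation = {'H': 'h', 'B': 'l', 'E': 's', 'G': 'h', 'I': 'h', 'T': 'l', 'S': 'l', '-': 'l'}
--     # Phase 1: merge consecutive residues with equal simplified type into runs (type, first_position)
--     runs = []
--     for residue in dssp_object:
--         t = SS_translation[residue[2]]
--         if not runs or runs[-1][0] != t:
--             runs.append((t, residue[0]))
--     # Phase 2: emit one line per run except the last, ending at the next run's first position - 1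
--     lines = ['type,end\n']
--     for (t, _), (_, nxt) in zip(runs, runs[1:]):
--         lines.append(f"{t},{nxt - 1}\n")
--     return ''.join(lines)
-- ===== Notes on version B (the rewrite author's own statement) =====
-- stated objective: alternative
-- what changed: B first reduces the residues into a list of runs (simplified type, first position) and then renders the CSV from adjacent run pairs, instead of A's single stateful pass that flushes a line inside the loop via a previous-type three-way branch.
import Mathlib
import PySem

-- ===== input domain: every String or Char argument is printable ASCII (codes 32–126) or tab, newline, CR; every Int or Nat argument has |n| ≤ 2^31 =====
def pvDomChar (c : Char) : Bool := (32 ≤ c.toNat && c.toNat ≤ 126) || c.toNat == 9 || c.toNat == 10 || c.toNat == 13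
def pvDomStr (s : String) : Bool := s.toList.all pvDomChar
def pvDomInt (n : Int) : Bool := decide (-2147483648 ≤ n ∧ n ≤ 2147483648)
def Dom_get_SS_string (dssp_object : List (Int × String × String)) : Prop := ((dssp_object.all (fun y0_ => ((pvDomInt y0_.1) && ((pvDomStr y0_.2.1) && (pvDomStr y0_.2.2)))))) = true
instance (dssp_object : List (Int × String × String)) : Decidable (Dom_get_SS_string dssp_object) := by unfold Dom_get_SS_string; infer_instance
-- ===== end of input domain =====

-- B builds the run list (simplified type, first position) first and then renders adjacent run
-- pairs, instead of A's single stateful pass flushing lines inside the loop (objective: alternative).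

-- ===== PORT A =====
-- the SS_translation dict literal (A re-creates it each iteration; it is constant)
def ssTranslation : PySem.Dict String String :=
  PySem.Dict.ofList [("H", "h"), ("B", "l"), ("E", "s"), ("G", "h"), ("I", "h"),
                     ("T", "l"), ("S", "l"), ("-", "l")]

-- one loop iteration of A: state = (SS_string, previous)
def stepA (st : String × String) (residue : Int × String × String) : String × String :=
  let simplified_secondary_structure := (ssTranslation.get? residue.2.2).getD ""  -- KeyError excluded by Pre_
  let position := residue.1
  if simplified_secondary_structure == st.2 then st
  else
    let s :=
      if st.2 == "h" then st.1 ++ "h," ++ PySem.Int.toStr (position - 1) ++ "\n"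
      else if st.2 == "s" then st.1 ++ "s," ++ PySem.Int.toStr (position - 1) ++ "\n"
      else if st.2 == "l" then st.1 ++ "l," ++ PySem.Int.toStr (position - 1) ++ "\n"
      else st.1
    (s, simplified_secondary_structure)

def get_SS_string (dssp_object : List (Int × String × String)) : String :=
  (dssp_object.foldl stepA ("type,end\n", "")).1

-- ===== PORT B =====
-- phase-1 loop body of B: append a new run when the type changes (or runs is empty)
def stepB (runs : List (String × Int)) (residue : Int × String × String) : List (String × Int) :=
  let t := (ssTranslation.get? residue.2.2).getD ""  -- KeyError excluded by Pre_
  match runs.getLast? with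
  | none => runs ++ [(t, residue.1)]
  | some last => if last.1 != t then runs ++ [(t, residue.1)] else runs

def get_SS_string_alt (dssp_object : List (Int × String × String)) : String :=
  let runs := dssp_object.foldl stepB []
  let lines := ["type,end\n"] ++
    (runs.zip runs.tail).map (fun p => p.1.1 ++ "," ++ PySem.Int.toStr (p.2.2 - 1) ++ "\n")
  String.join lines

-- ===== PRECONDITION & SPEC =====
-- Pre_ excludes exactly the inputs on which A raises KeyError (an SS code outside the
-- translation dict); B raises KeyError there too.
def Pre_get_SS_string (dssp_object : List (Int × String × String)) : Prop :=
  ∀ r ∈ dssp_object, r.2.2 ∈ ["H", "B", "E", "G", "I", "T", "S", "-"]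
instance (dssp_object : List (Int × String × String)) : Decidable (Pre_get_SS_string dssp_object) := by
  unfold Pre_get_SS_string; infer_instance

def pvWitness_get_SS_string : (List (Int × String × String)) :=
  [(3, "A", "H"), (4, "A", "H"), (7, "A", "E"), (9, "A", "-")]

def Spec_get_SS_string (dssp_object : List (Int × String × String)) (out : String) : Prop := out = get_SS_string_alt dssp_object
instance (dssp_object : List (Int × String × String)) (out : String) : Decidable (Spec_get_SS_string dssp_object out) := by unfold Spec_get_SS_string; infer_instance

-- ===== CLAIM (what is proved, stated in full; the proofs are below) =====
def Claim_equal_get_SS_string : Prop := ∀ (dssp_object : List (Int × String × String)), Dom_get_SS_string dssp_object → Pre_get_SS_string dssp_object → Spec_get_SS_string dssp_object (get_SS_string dssp_object)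

-- ===== LEMMAS AND PROOFS =====

-- the translated type of a residue
def trOf (r : Int × String × String) : String := (ssTranslation.get? r.2.2).getD ""

-- what A appends after the header, given the current 'previous' value
def emitA (p : String) : List (Int × String × String) → String
  | [] => ""
  | r :: rest =>
      let t := trOf r
      if t == p then emitA p rest
      else (if p == "h" then "h," ++ PySem.Int.toStr (r.1 - 1) ++ "\n"
            else if p == "s" then "s," ++ PySem.Int.toStr (r.1 - 1) ++ "\n"
            else if p == "l" then "l," ++ PySem.Int.toStr (r.1 - 1) ++ "\n"
            else "") ++ emitA t rest

-- the runs B's phase 1 appends after a last run of type p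
def runsAux (p : String) : List (Int × String × String) → List (String × Int)
  | [] => []
  | r :: rest =>
      let t := trOf r
      if t == p then runsAux p rest else (t, r.1) :: runsAux t rest

-- what B's phase 2 renders from a run list
def render : List (String × Int) → String
  | (t, _) :: r₂ :: rest => t ++ "," ++ PySem.Int.toStr (r₂.2 - 1) ++ "\n" ++ render (r₂ :: rest)
  | _ => ""

theorem foldl_stepA (l : List (Int × String × String)) :
    ∀ s p, (l.foldl stepA (s, p)).1 = s ++ emitA p l := by
  induction l with
  | nil => intro s p; simp [emitA]
  | cons r rest ih =>
      intro s p
      simp only [List.foldl_cons, stepA, emitA, trOf]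
      by_cases h : ((ssTranslation.get? r.2.2).getD "") == p
      · simp [h, ih]
      · split_ifs <;> simp [ih, String.append_assoc]

theorem foldl_stepB (l : List (Int × String × String)) :
    ∀ (acc : List (String × Int)) p pos, acc.getLast? = some (p, pos) →
      l.foldl stepB acc = acc ++ runsAux p l := by
  induction l with
  | nil => intro acc p pos _; simp [runsAux]
  | cons r rest ih =>
      intro acc p pos hlast
      simp only [List.foldl_cons, stepB, hlast, runsAux, trOf]
      by_cases h : ((ssTranslation.get? r.2.2).getD "") = p
      · rw [if_neg (by simp [h]), ih acc p pos hlast, if_pos (by simp [h])]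
      · have hne : (p != (ssTranslation.get? r.2.2).getD "") = true := by
          simp; exact fun e => h e.symm
        rw [if_pos hne, ih (acc ++ [((ssTranslation.get? r.2.2).getD "", r.1)])
              ((ssTranslation.get? r.2.2).getD "") r.1 (by simp), if_neg (by simp [h])]
        simp

theorem pv_join_foldl (l : List String) : ∀ s : String, l.foldl (· ++ ·) s = s ++ String.join l := by
  induction l with
  | nil => intro s; simp [String.join]
  | cons a tl ih =>
      intro s
      simp only [String.join, List.foldl_cons] at *
      rw [ih (s ++ a), ih ("" ++ a)]
      simp [String.append_assoc]

theorem pv_join_cons (a : String) (l : List String) :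
    String.join (a :: l) = a ++ String.join l := by
  simp only [String.join, List.foldl_cons]
  rw [pv_join_foldl l]
  simp [String.join]

theorem join_zip_render (rs : List (String × Int)) :
    String.join (["type,end\n"] ++ (rs.zip rs.tail).map
        (fun p => p.1.1 ++ "," ++ PySem.Int.toStr (p.2.2 - 1) ++ "\n"))
      = "type,end\n" ++ render rs := by
  rw [List.singleton_append, pv_join_cons]
  congr 1
  induction rs with
  | nil => simp [render, String.join]
  | cons a tl ih =>
      cases tl with
      | nil => simp [render, String.join]
      | cons b tl' =>
          obtain ⟨t, x⟩ := a
          simp only [List.tail_cons, List.zip_cons_cons, List.map_cons] at ih ⊢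
          rw [pv_join_cons, ih]
          simp [render, String.append_assoc]

-- every residue admitted by Pre_ translates to "h", "s" or "l"
theorem trOf_mem (r : Int × String × String)
    (h : r.2.2 ∈ ["H", "B", "E", "G", "I", "T", "S", "-"]) :
    trOf r ∈ ["h", "s", "l"] := by
  obtain ⟨n, s1, s2⟩ := r
  simp only [List.mem_cons, List.not_mem_nil, or_false] at h
  rcases h with h | h | h | h | h | h | h | h <;> subst h <;> simp only [trOf] <;> decide

theorem emitA_eq_render (l : List (Int × String × String)) :
    ∀ p x, (∀ r ∈ l, trOf r ∈ ["h", "s", "l"]) → p ∈ ["h", "s", "l"] →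
      emitA p l = render ((p, x) :: runsAux p l) := by
  induction l with
  | nil => intro p x _ _; simp [emitA, runsAux, render]
  | cons r rest ih =>
      intro p x hval hp
      have hr : trOf r ∈ ["h", "s", "l"] := hval r (by simp)
      have hrest : ∀ r' ∈ rest, trOf r' ∈ ["h", "s", "l"] := fun r' h' => hval r' (by simp [h'])
      simp only [emitA, runsAux]
      by_cases h : trOf r == p
      · simp [h, ih p x hrest hp]
      · simp only [h]
        have hline : (if p == "h" then "h," ++ PySem.Int.toStr (r.1 - 1) ++ "\n"
            else if p == "s" then "s," ++ PySem.Int.toStr (r.1 - 1) ++ "\n"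
            else if p == "l" then "l," ++ PySem.Int.toStr (r.1 - 1) ++ "\n"
            else "") = p ++ "," ++ PySem.Int.toStr (r.1 - 1) ++ "\n" := by
          simp only [List.mem_cons, List.not_mem_nil, or_false] at hp
          rcases hp with h | h | h <;> simp [h]
        rw [hline, ih (trOf r) r.1 hrest hr]
        simp [render, String.append_assoc]

-- ===== VERDICT (by name: the statement is the Claim_ definition above) =====
theorem get_SS_string_spec : Claim_equal_get_SS_string := by
  intro l _ hpre
  unfold Spec_get_SS_string get_SS_string get_SS_string_alt
  rw [foldl_stepA, join_zip_render]
  cases l with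
  | nil => simp [emitA, render]
  | cons r rest =>
      have hr : trOf r ∈ ["h", "s", "l"] := trOf_mem r (hpre r (by simp))
      have hrest : ∀ r' ∈ rest, trOf r' ∈ ["h", "s", "l"] :=
        fun r' h' => trOf_mem r' (hpre r' (by simp [h']))
      have hne : ¬ (trOf r == "") := by
        simp only [List.mem_cons, List.not_mem_nil, or_false] at hr
        rcases hr with h | h | h <;> simp [h]
      simp only [List.foldl_cons, stepB]
      rw [show ([] : List (String × Int)).getLast? = none from rfl]
      simp only [List.nil_append]
      rw [foldl_stepB rest [((ssTranslation.get? r.2.2).getD "", r.1)]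
            ((ssTranslation.get? r.2.2).getD "") r.1 (by simp)]
      simp only [emitA, trOf] at *
      rw [if_neg (by simpa [trOf] using hne)]
      have := emitA_eq_render rest ((ssTranslation.get? r.2.2).getD "") r.1 hrest (by simpa [trOf] using hr)
      simpa [String.append_assoc] using this
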